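-- pv_equiv track=rewrite | github.com/paulyurlov/cs_project | functions.py | idtoname
-- ===== SOURCE A (Python) =====
-- def idtoname(x):
--     id_x = int(x)
--     result = ''
--     if id_x < 0:
--         result += 'z'
--         id_x = -1 * id_x
--     while id_x > 0:
--         result += chr(id_x % 10 + 97)
--         id_x = id_x // 10
--     return result
-- ===== SOURCE B (Python) =====
-- def idtoname(x):
--     n = int(x)
--     sign = ''
--     if n < 0:
--         sign = 'z'
--         n = -n
--     digits = '' if n == 0 else ''.join(chr(int(c) + 97) for c in str(n)[::-1])
--     return sign + digits
-- ===== Notes on version B (the rewrite author's own statement) =====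
-- stated objective: idiomatic
-- what changed: Replaces the mod/div while loop with a single pass over the reversed decimal string str(n), mapping each digit character to its letter; the sign-prefix handling is kept.
import Mathlib
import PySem

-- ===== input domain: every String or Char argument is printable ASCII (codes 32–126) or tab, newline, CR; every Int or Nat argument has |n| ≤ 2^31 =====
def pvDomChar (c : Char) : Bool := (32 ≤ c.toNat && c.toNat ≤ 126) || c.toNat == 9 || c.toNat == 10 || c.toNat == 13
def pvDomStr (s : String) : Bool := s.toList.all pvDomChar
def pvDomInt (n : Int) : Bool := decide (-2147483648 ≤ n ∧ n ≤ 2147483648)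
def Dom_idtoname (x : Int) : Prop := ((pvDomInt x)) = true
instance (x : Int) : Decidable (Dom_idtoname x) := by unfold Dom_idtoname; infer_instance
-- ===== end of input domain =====

-- B replaces A's mod/div while loop by mapping the reversed decimal string of |n| to letters (idiomatic rewrite, same cost).


-- ===== PORT A =====
-- the while loop: result += chr(id_x % 10 + 97); id_x = id_x // 10
def idtonameLoop (idx : Int) (result : List Char) : List Char :=
  if h : idx > 0 then
    idtonameLoop (PySem.Int.floordiv idx 10) (result ++ [Char.ofNat (PySem.Int.mod idx 10 + 97).toNat])
  else result
termination_by idx.toNat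
decreasing_by
  rw [PySem.Int.floordiv_eq_ediv_of_pos (by omega : (0:Int) < 10)]
  omega

-- int(x) on an int is the identity; the string is built as a List Char
def idtoname (x : Int) : String :=
  if x < 0 then String.ofList (idtonameLoop (-1 * x) ['z'])
  else String.ofList (idtonameLoop x [])

-- ===== PORT B =====
-- str(n)[::-1] is the reversed decimal string ((Int.toChars n).reverse); int(c) for a
-- decimal digit character c is c.toNat - 48 (exact on str(n)'s characters)
def idtoname_alt (x : Int) : String :=
  let n := x
  let sign : List Char := if n < 0 then ['z'] else []
  let m : Int := if n < 0 then -n else n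
  let digits : List Char :=
    if m = 0 then []
    else ((PySem.Int.toChars m).reverse).map (fun c => Char.ofNat (c.toNat - 48 + 97))
  String.ofList (sign ++ digits)

-- ===== PRECONDITION & SPEC =====
def Spec_idtoname (x : Int) (out : String) : Prop := out = idtoname_alt x
instance (x : Int) (out : String) : Decidable (Spec_idtoname x out) := by unfold Spec_idtoname; infer_instance

-- ===== CLAIM (what is proved, stated in full; the proofs are below) =====
def Claim_equal_idtoname : Prop := ∀ (x : Int), Dom_idtoname x → Spec_idtoname x (idtoname x)

-- ===== LEMMAS AND PROOFS =====

-- the letter characters A's loop emits for a nonnegative value, LSB first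
def aChars : Nat → List Char
  | 0 => []
  | n+1 => Char.ofNat ((n+1) % 10 + 97) :: aChars ((n+1) / 10)
decreasing_by exact Nat.div_lt_self (Nat.succ_pos n) (by omega)

lemma aChars_pos {n : Nat} (h : 0 < n) :
    aChars n = Char.ofNat (n % 10 + 97) :: aChars (n / 10) := by
  obtain ⟨m, rfl⟩ := Nat.exists_eq_succ_of_ne_zero (Nat.pos_iff_ne_zero.mp h)
  rw [aChars]

lemma idtonameLoop_eq (n : Nat) : ∀ acc, idtonameLoop (n : Int) acc = acc ++ aChars n := by
  induction n using Nat.strong_induction_on with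
  | _ n ih =>
    intro acc
    rw [idtonameLoop]
    by_cases h : 0 < n
    · have hpos : ((n : Int) > 0) := by exact_mod_cast h
      rw [dif_pos hpos]
      have hm : PySem.Int.mod (n : Int) 10 = ((n % 10 : Nat) : Int) := by
        exact_mod_cast PySem.Int.mod_natCast n 10
      have hd : PySem.Int.floordiv (n : Int) 10 = ((n / 10 : Nat) : Int) := by
        exact_mod_cast PySem.Int.floordiv_natCast n 10
      have hc : Char.ofNat (PySem.Int.mod (n : Int) 10 + 97).toNat = Char.ofNat (n % 10 + 97) := by
        rw [hm]; congr 1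
      rw [hc, hd, ih (n / 10) (Nat.div_lt_self h (by omega)), aChars_pos h]
      simp
    · have : ¬ ((n : Int) > 0) := by exact_mod_cast h
      rw [dif_neg this]
      have : n = 0 := by omega
      simp [this, aChars]

-- g maps a decimal digit character back to A's letter
lemma g_digitChar (d : Nat) (hd : d < 10) :
    Char.ofNat ((Nat.digitChar d).toNat - 48 + 97) = Char.ofNat (d + 97) := by
  interval_cases d <;> rfl

-- decimal digit characters of a positive value, least significant first
def dChars : Nat → List Char
  | 0 => []
  | n+1 => Nat.digitChar ((n+1) % 10) :: dChars ((n+1) / 10)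
decreasing_by exact Nat.div_lt_self (Nat.succ_pos n) (by omega)

lemma dChars_pos {n : Nat} (h : 0 < n) :
    dChars n = Nat.digitChar (n % 10) :: dChars (n / 10) := by
  obtain ⟨m, rfl⟩ := Nat.exists_eq_succ_of_ne_zero (Nat.pos_iff_ne_zero.mp h)
  rw [dChars]

-- Nat.toDigits via its fueled core: enough fuel gives the reverse of the LSB-first digits
lemma toDigitsCore_eq : ∀ f n acc, n < f → 0 < n →
    Nat.toDigitsCore 10 f n acc = (dChars n).reverse ++ acc := by
  intro f
  induction f with
  | zero => omega
  | succ f ih =>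
    intro n acc hlt hpos
    rw [Nat.toDigitsCore, dChars_pos hpos]
    by_cases h0 : n / 10 = 0
    · simp [h0, dChars]
    · have h1 : n / 10 < f := lt_of_lt_of_le (Nat.div_lt_self hpos (by omega)) (by omega)
      simp only [if_neg h0, ih (n / 10) _ h1 (Nat.pos_of_ne_zero h0)]
      simp

lemma toDigits_map (n : Nat) (h : 0 < n) :
    ((Nat.toDigits 10 n).reverse).map (fun c => Char.ofNat (c.toNat - 48 + 97)) = aChars n := by
  rw [Nat.toDigits, toDigitsCore_eq (n + 1) n [] (by omega) h]
  simp only [List.append_nil, List.reverse_reverse]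
  induction n using Nat.strong_induction_on with
  | _ n ih =>
    by_cases hp : 0 < n
    · rw [dChars_pos hp, aChars_pos hp, List.map_cons,
        g_digitChar (n % 10) (Nat.mod_lt n (by omega))]
      by_cases h10 : 0 < n / 10
      · rw [ih (n / 10) (Nat.div_lt_self hp (by omega)) h10]
      · have : n / 10 = 0 := by omega
        simp [this, dChars, aChars]
    · have : n = 0 := by omega
      simp [this, dChars, aChars]

lemma idtonameLoop_eq_toChars (m : Int) (hm : 0 < m) :
    idtonameLoop m [] =
      ((PySem.Int.toChars m).reverse).map (fun c => Char.ofNat (c.toNat - 48 + 97)) := by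
  have hcast : m = ((m.toNat : Nat) : Int) := by omega
  have htn : 0 < m.toNat := by omega
  rw [hcast, idtonameLoop_eq m.toNat []]
  have : PySem.Int.toChars ((m.toNat : Nat) : Int) = Nat.toDigits 10 m.toNat := by
    unfold PySem.Int.toChars
    rw [if_neg (by omega)]
    congr 1
  rw [this, toDigits_map m.toNat htn]
  simp

-- ===== VERDICT (by name: the statement is the Claim_ definition above) =====
theorem idtoname_spec : Claim_equal_idtoname := by
  intro x _
  unfold Spec_idtoname idtoname idtoname_alt
  by_cases hx : x < 0
  · rw [if_pos hx]
    simp only [hx, if_pos, if_neg (by omega : ¬ (-x = 0))]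
    have h1 : -1 * x = -x := by ring
    have h2 : idtonameLoop (-x) ['z'] = ['z'] ++ idtonameLoop (-x) [] := by
      have hc : (-x) = (((-x).toNat : Nat) : Int) := by omega
      rw [hc, idtonameLoop_eq, idtonameLoop_eq]
      simp
    rw [h1, h2, idtonameLoop_eq_toChars (-x) (by omega)]
  · rw [if_neg hx]
    simp only [hx, if_neg, not_false_iff]
    by_cases h0 : x = 0
    · subst h0
      rw [idtonameLoop]
      simp
    · rw [if_neg h0, idtonameLoop_eq_toChars x (by omega)]
      simp
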